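-- pv_equiv track=rewrite | github.com/clsmith70/AOC | day2/solution2.py | part1
-- ===== SOURCE A (Python) =====
-- def check_key(button: tuple, keypad: list) -> bool:
--     """Check if the button is valid"""
--
--     # separate the button coordinates
--     y, x = button
--     # if the location is a non-button location
--     if keypad[y][x] == 'X':
--         # return false
--         return False
--     # otherwise, return true
--     return True
--
-- def next_button(button: tuple, direction: str, keypad: list) -> tuple:
--     """Get the button at next position"""
--
--     # set the min and max range of the keypad
--     min_range = 0
--     max_range = len(keypad) - 1
--     # separate the button coordinates
--     y, x = button
--
--     # check which direction to move
--     if direction == 'U':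
--         # go up, subtracting from y
--         y -= 1
--         # if y is below the minimum range, set it to the minimum
--         if y < min_range:
--             y = min_range
--         # if the location is a non-button, go down a step
--         if not check_key((y, x), keypad):
--             y += 1
--
--     elif direction == 'D':
--         # go down, adding to y
--         y += 1
--         # if y is above the maximum range, set it to the maximum
--         if y > max_range:
--             y = max_range
--         # if the location is a non-button, go up a step
--         if not check_key((y, x), keypad):
--             y -= 1
--
--     elif direction == 'L':
--         # go left, subtracting from x
--         x -= 1
--         # if x is below the minimum range, set it to the minimum
--         if x < min_range:
--             x = min_range
--         # if the location is a non-button, go right a step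
--         if not check_key((y, x), keypad):
--             x += 1
--
--     elif direction == 'R':
--         # go right, adding to x
--         x += 1
--         # if x is above the maximum range, set it to the maximum
--         if x > max_range:
--             x = max_range
--         # if the location is a non-button, go left a step
--         if not check_key((y, x), keypad):
--             x -= 1
--
--     return y, x
--
-- def part1(data):
--     """Solve part 1"""
--
--     # set the expected keypad layout
--     keypad = [
--         ['1', '2', '3'],
--         ['4', '5', '6'],
--         ['7', '8', '9']
--     ]
--
--     # initialize the code and set the first button coordinates
--     code = ""
--     button = (1, 1) # the 5 button in the center
--
--     for line in data:
--         for char in line: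
--             # get the next button for the current step
--             button = next_button(button, char, keypad)
--         # once the line is complete, get the coordinates of the button
--         y, x = button
--         # add the button to the code
--         code += keypad[y][x]
--
--     return code
-- ===== SOURCE B (Python) =====
-- # Precomputed per-direction transition tables on the digits themselves;
-- # a move off the edge maps a digit to itself.
-- _UP    = {'1': '1', '2': '2', '3': '3', '4': '1', '5': '2', '6': '3', '7': '4', '8': '5', '9': '6'}
-- _DOWN  = {'1': '4', '2': '5', '3': '6', '4': '7', '5': '8', '6': '9', '7': '7', '8': '8', '9': '9'}
-- _LEFT  = {'1': '1', '2': '1', '3': '2', '4': '4', '5': '4', '6': '5', '7': '7', '8': '7', '9': '8'}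
-- _RIGHT = {'1': '2', '2': '3', '3': '3', '4': '5', '5': '6', '6': '6', '7': '8', '8': '9', '9': '9'}
--
-- def _move(cur, ch):
--     if ch == 'U':
--         return _UP.get(cur, cur)
--     elif ch == 'D':
--         return _DOWN.get(cur, cur)
--     elif ch == 'L':
--         return _LEFT.get(cur, cur)
--     elif ch == 'R':
--         return _RIGHT.get(cur, cur)
--     else:
--         return cur
--
-- def part1(data):
--     """Solve part 1"""
--     cur = '5'
--     digits = []
--     for line in data:
--         for ch in line:
--             cur = _move(cur, ch)
--         digits.append(cur)
--     return ''.join(digits)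
-- ===== Notes on version B (the rewrite author's own statement) =====
-- stated objective: idiomatic
-- what changed: Replaces A's coordinate pair with clamping arithmetic and keypad indexing by a precomputed digit-to-digit transition table per direction, tracking the current digit directly and joining a list at the end.
import Mathlib
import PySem

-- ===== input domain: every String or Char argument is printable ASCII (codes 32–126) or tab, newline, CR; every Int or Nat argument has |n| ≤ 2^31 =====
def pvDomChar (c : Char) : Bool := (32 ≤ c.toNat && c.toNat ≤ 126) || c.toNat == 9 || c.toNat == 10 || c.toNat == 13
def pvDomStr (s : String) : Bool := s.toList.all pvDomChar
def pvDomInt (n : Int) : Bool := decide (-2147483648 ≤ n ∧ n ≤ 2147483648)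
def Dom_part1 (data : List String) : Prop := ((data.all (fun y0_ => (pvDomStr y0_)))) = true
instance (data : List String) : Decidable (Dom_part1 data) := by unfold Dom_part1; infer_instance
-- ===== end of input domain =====

-- B replaces A's coordinate arithmetic with a precomputed digit-to-digit transition
-- table per direction (idiomatic/alternative; no speed claim).

-- ===== PORT A =====
def keypadA : List (List Char) := [['1', '2', '3'], ['4', '5', '6'], ['7', '8', '9']]

-- keypad[y][x] == 'X' ; out-of-range would raise in Python (never reached in part1's use)
def checkKey (button : Int × Int) (keypad : List (List Char)) : Bool :=
  match PySem.List.pyGet? keypad button.1 with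
  | some row =>
    match PySem.List.pyGet? row button.2 with
    | some c => !(c = 'X')
    | none => false
  | none => false

def nextButton (button : Int × Int) (direction : Char) (keypad : List (List Char)) : Int × Int :=
  let minRange : Int := 0
  let maxRange : Int := (keypad.length : Int) - 1
  let y := button.1
  let x := button.2
  if direction = 'U' then
    let y := y - 1
    let y := if y < minRange then minRange else y
    let y := if !checkKey (y, x) keypad then y + 1 else y
    (y, x)
  else if direction = 'D' then
    let y := y + 1
    let y := if y > maxRange then maxRange else y
    let y := if !checkKey (y, x) keypad then y - 1 else y
    (y, x)
  else if direction = 'L' then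
    let x := x - 1
    let x := if x < minRange then minRange else x
    let x := if !checkKey (y, x) keypad then x + 1 else x
    (y, x)
  else if direction = 'R' then
    let x := x + 1
    let x := if x > maxRange then maxRange else x
    let x := if !checkKey (y, x) keypad then x - 1 else x
    (y, x)
  else
    (y, x)

-- one iteration of A's outer loop: walk the line, then append keypad[y][x] to code
def lineStepA (st : String × (Int × Int)) (line : String) : String × (Int × Int) :=
  let button := line.toList.foldl (fun b c => nextButton b c keypadA) st.2
  let digit : String :=
    match PySem.List.pyGet? keypadA button.1 with
    | some row =>
      match PySem.List.pyGet? row button.2 with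
      | some c => String.singleton c
      | none => ""   -- would raise in Python; unreachable here
    | none => ""
  (st.1 ++ digit, button)

def part1 (data : List String) : String :=
  (data.foldl lineStepA ("", (1, 1))).1

-- ===== PORT B =====
def upB : Char → Char
  | '1' => '1' | '2' => '2' | '3' => '3' | '4' => '1' | '5' => '2'
  | '6' => '3' | '7' => '4' | '8' => '5' | '9' => '6' | c => c

def downB : Char → Char
  | '1' => '4' | '2' => '5' | '3' => '6' | '4' => '7' | '5' => '8'
  | '6' => '9' | '7' => '7' | '8' => '8' | '9' => '9' | c => c

def leftB : Char → Char
  | '1' => '1' | '2' => '1' | '3' => '2' | '4' => '4' | '5' => '4'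
  | '6' => '5' | '7' => '7' | '8' => '7' | '9' => '8' | c => c

def rightB : Char → Char
  | '1' => '2' | '2' => '3' | '3' => '3' | '4' => '5' | '5' => '6'
  | '6' => '6' | '7' => '8' | '8' => '9' | '9' => '9' | c => c

def moveB (cur ch : Char) : Char :=
  if ch = 'U' then upB cur
  else if ch = 'D' then downB cur
  else if ch = 'L' then leftB cur
  else if ch = 'R' then rightB cur
  else cur

def lineStepB (st : Char × List Char) (line : String) : Char × List Char :=
  let cur := line.toList.foldl moveB st.1
  (cur, st.2 ++ [cur])

def part1_alt (data : List String) : String :=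
  String.ofList (data.foldl lineStepB ('5', [])).2

-- ===== PRECONDITION & SPEC =====
def Spec_part1 (data : List String) (out : String) : Prop := out = part1_alt data
instance (data : List String) (out : String) : Decidable (Spec_part1 data out) := by unfold Spec_part1; infer_instance

-- ===== CLAIM (what is proved, stated in full; the proofs are below) =====
def Claim_equal_part1 : Prop := ∀ (data : List String), Dom_part1 data → Spec_part1 data (part1 data)

-- ===== LEMMAS AND PROOFS =====

-- the nine reachable states of A paired with the digit B tracks
def L9 : List ((Int × Int) × Char) :=
  [((0,0),'1'), ((0,1),'2'), ((0,2),'3'),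
   ((1,0),'4'), ((1,1),'5'), ((1,2),'6'),
   ((2,0),'7'), ((2,1),'8'), ((2,2),'9')]

theorem step_mem (b : Int × Int) (d : Char) (h : (b, d) ∈ L9) (c : Char) :
    (nextButton b c keypadA, moveB d c) ∈ L9 := by
  by_cases hU : c = 'U'
  · subst hU; fin_cases h <;> decide
  · by_cases hD : c = 'D'
    · subst hD; fin_cases h <;> decide
    · by_cases hL : c = 'L'
      · subst hL; fin_cases h <;> decide
      · by_cases hR : c = 'R'
        · subst hR; fin_cases h <;> decide
        · have hA : nextButton b c keypadA = b := by
            simp [nextButton, hU, hD, hL, hR]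
          have hB : moveB d c = d := by
            simp [moveB, hU, hD, hL, hR]
          rw [hA, hB]; exact h

theorem fold_mem (cs : List Char) (b : Int × Int) (d : Char) (h : (b, d) ∈ L9) :
    (cs.foldl (fun b c => nextButton b c keypadA) b, cs.foldl moveB d) ∈ L9 := by
  induction cs generalizing b d with
  | nil => simpa using h
  | cons c cs ih => exact ih _ _ (step_mem b d h c)

theorem read_digit (b : Int × Int) (d : Char) (h : (b, d) ∈ L9) :
    (match PySem.List.pyGet? keypadA b.1 with
     | some row =>
       match PySem.List.pyGet? row b.2 with
       | some c => String.singleton c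
       | none => ""
     | none => "") = String.singleton d := by
  fin_cases h <;> rfl

theorem mk_append (l : List Char) (c : Char) :
    String.ofList l ++ String.singleton c = String.ofList (l ++ [c]) := by
  simp [String.singleton]; rfl

theorem main_loop (data : List String) (b : Int × Int) (d : Char) (acc : List Char)
    (h : (b, d) ∈ L9) :
    (data.foldl lineStepA (String.ofList acc, b)).1
      = String.ofList (data.foldl lineStepB (d, acc)).2 := by
  induction data generalizing b d acc with
  | nil => rfl
  | cons line rest ih =>
    have hmem := fold_mem line.toList b d h
    simp only [List.foldl_cons, lineStepA, lineStepB]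
    rw [read_digit _ _ hmem, mk_append]
    exact ih _ _ _ hmem

-- ===== VERDICT (by name: the statement is the Claim_ definition above) =====
theorem part1_spec : Claim_equal_part1 := by
  intro data _
  show part1 data = part1_alt data
  have := main_loop data (1,1) '5' [] (by decide)
  simpa [part1, part1_alt] using this
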